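-- pv_equiv track=rewrite | github.com/chulsea/TIL | algorithm/Python/algorithm/problems/hunter.py | solution
-- ===== SOURCE A (Python) =====
-- dx = [-1, 0, 1, -1, 1, -1, 0, 1]
--
-- dy = [-1, -1, -1, 0, 0, 1, 1, 1]
--
-- def __is_hunting(arr, y, x, i):
--     n = len(arr)
--     if 0 <= y < n and 0 <= x < n:
--         if arr[y][x] == 2:
--             return __is_hunting(arr, y+dy[i], x+dx[i], i)
--         elif arr[y][x] == 1:
--             return True
--     return False
--
-- def solution(arr):
--     n = len(arr)
--     answer = 0
--     for y in range(n):
--         for x in range(n):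
--             if arr[y][x] == 2:
--                 for i in range(8):
--                     ny = y + dy[i]
--                     nx = x + dx[i]
--                     if __is_hunting(arr, ny, nx, i):
--                         answer += 1
--                         break
--     return answer
-- ===== SOURCE B (Python) =====
-- dx = [-1, 0, 1, -1, 1, -1, 0, 1]
--
-- dy = [-1, -1, -1, 0, 0, 1, 1, 1]
--
-- def solution(arr):
--     n = len(arr)
--     good = set()
--     for i in range(8):
--         dyi, dxi = dy[i], dx[i]
--         ys = range(n)
--         if dyi == 1:
--             ys = reversed(ys)
--         ys = list(ys)
--         xs = range(n)
--         if dxi == 1: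
--             xs = reversed(xs)
--         xs = list(xs)
--         reach = set()
--         for y in ys:
--             for x in xs:
--                 v = arr[y][x]
--                 if v == 1 or (v == 2 and (y + dyi, x + dxi) in reach):
--                     reach.add((y, x))
--         good = good | reach
--     total = 0
--     for y in range(n):
--         for x in range(n):
--             if arr[y][x] == 2 and (y, x) in good:
--                 total += 1
--     return total
-- ===== Notes on version B (the rewrite author's own statement) =====
-- stated objective: alternative
-- what changed: Replaces A's per-cell recursive ray walk in each of the 8 directions by a per-direction dynamic program that sweeps the grid once in topological order of the rays, computing each cell's reachability in O(1) from its already-computed neighbour.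
import Mathlib
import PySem

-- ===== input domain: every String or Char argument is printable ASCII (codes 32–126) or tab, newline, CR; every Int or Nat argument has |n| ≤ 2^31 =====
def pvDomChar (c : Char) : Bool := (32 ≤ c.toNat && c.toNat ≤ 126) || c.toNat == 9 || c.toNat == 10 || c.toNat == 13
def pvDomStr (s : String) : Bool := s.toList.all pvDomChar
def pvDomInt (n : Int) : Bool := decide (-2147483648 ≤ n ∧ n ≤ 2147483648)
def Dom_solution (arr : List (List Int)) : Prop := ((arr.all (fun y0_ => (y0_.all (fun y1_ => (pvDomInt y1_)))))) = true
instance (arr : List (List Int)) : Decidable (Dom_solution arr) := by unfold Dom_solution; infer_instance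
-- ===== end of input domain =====

-- B replaces A's per-cell recursive ray walk by one topological-order dynamic-programming
-- sweep per direction. Return-value equivalence only.

-- ===== PORT A =====
def pvDxl : List Int := [-1, 0, 1, -1, 1, -1, 0, 1]
def pvDyl : List Int := [-1, -1, -1, 0, 0, 1, 1, 1]

-- arr[y][x]; in-range under Pre_solution (the default is never read inside the claim's domain)
def pvCell (arr : List (List Int)) (y x : Int) : Int :=
  (PySem.List.pyGet? ((PySem.List.pyGet? arr y).getD []) x).getD 0

-- __is_hunting: Python's unbounded recursion, made structural by a fuel guard only;
-- the lemmas below show fuel arr.length + 1 is saturated at every call site.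
def pvIsHunting (arr : List (List Int)) (fuel : Nat) (y x : Int) (i : Int) : Bool :=
  match fuel with
  | 0 => false
  | f + 1 =>
    let n : Int := arr.length
    if 0 ≤ y ∧ y < n ∧ 0 ≤ x ∧ x < n then
      if pvCell arr y x == 2 then
        pvIsHunting arr f (y + (PySem.List.pyGet? pvDyl i).getD 0)
          (x + (PySem.List.pyGet? pvDxl i).getD 0) i
      else pvCell arr y x == 1
    else false

def solution (arr : List (List Int)) : Int :=
  let n : Int := arr.length
  (PySem.List.pyRange 0 n 1).foldl (fun answer y =>
    (PySem.List.pyRange 0 n 1).foldl (fun answer x =>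
      if pvCell arr y x == 2 then
        if (PySem.List.pyRange 0 8 1).any (fun i =>
            pvIsHunting arr (arr.length + 1)
              (y + (PySem.List.pyGet? pvDyl i).getD 0)
              (x + (PySem.List.pyGet? pvDxl i).getD 0) i)
        then answer + 1 else answer
      else answer) answer) 0

-- ===== PORT B =====
-- one sweep per direction, in topological order of the rays
-- ===== PORT B =====
-- one sweep per direction, in topological order of the rays
def pvReachDir (arr : List (List Int)) (dyi dxi : Int) : PySem.Set (Int × Int) :=
  let n : Int := arr.length
  let ys0 := PySem.List.pyRange 0 n 1
  let ys := if dyi == 1 then ys0.reverse else ys0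
  let xs0 := PySem.List.pyRange 0 n 1
  let xs := if dxi == 1 then xs0.reverse else xs0
  ys.foldl (fun r y => xs.foldl (fun r x =>
      let v := pvCell arr y x
      if v == 1 || (v == 2 && PySem.Set.contains r (y + dyi, x + dxi)) then
        PySem.Set.add r (y, x)
      else r) r) PySem.Set.empty

def solution_alt (arr : List (List Int)) : Int :=
  let n : Int := arr.length
  let good := (PySem.List.pyRange 0 8 1).foldl (fun good i =>
      PySem.Set.union good
        (pvReachDir arr ((PySem.List.pyGet? pvDyl i).getD 0)
                        ((PySem.List.pyGet? pvDxl i).getD 0))) PySem.Set.empty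
  (PySem.List.pyRange 0 n 1).foldl (fun t y =>
    (PySem.List.pyRange 0 n 1).foldl (fun t x =>
      if pvCell arr y x == 2 && PySem.Set.contains good (y, x) then t + 1 else t) t) 0

-- ===== PRECONDITION & SPEC =====
-- Pre_ excludes exactly the ragged inputs on which Python's arr[y][x] raises IndexError
-- (a row shorter than the number of rows); A returns normally on everything else.

-- ===== PRECONDITION & SPEC =====
-- Pre_ excludes exactly the ragged inputs on which Python's arr[y][x] raises IndexError
-- (a row shorter than the number of rows); A returns normally on everything else.
def Pre_solution (arr : List (List Int)) : Prop := ∀ row ∈ arr, arr.length ≤ row.length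
instance (arr : List (List Int)) : Decidable (Pre_solution arr) := by unfold Pre_solution; infer_instance
def pvWitness_solution : List (List Int) := [[2, 1], [0, 0]]

def Spec_solution (arr : List (List Int)) (out : Int) : Prop := out = solution_alt arr
instance (arr : List (List Int)) (out : Int) : Decidable (Spec_solution arr out) := by unfold Spec_solution; infer_instance

-- ===== CLAIM (what is proved, stated in full; the proofs are below) =====
def Claim_equal_solution : Prop := ∀ (arr : List (List Int)), Dom_solution arr → Pre_solution arr → Spec_solution arr (solution arr)

-- ===== LEMMAS AND PROOFS =====
-- proof-side helpers
def pvInB (n y x : Int) : Prop := 0 ≤ y ∧ y < n ∧ 0 ≤ x ∧ x < n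
def pvDirOK (dyi dxi : Int) : Prop := dyi = -1 ∨ dyi = 1 ∨ (dyi = 0 ∧ (dxi = -1 ∨ dxi = 1))
def pvPhi (n dyi dxi y x : Int) : Nat :=
  if dyi = -1 then (y + 1).toNat else if dyi = 1 then (n - y).toNat
  else if dxi = -1 then (x + 1).toNat else (n - x).toNat
def pvHunt (arr : List (List Int)) (y x : Int) (i : Int) : Bool :=
  pvIsHunting arr (arr.length + 1) y x i

lemma pv_hunt_oob (arr : List (List Int)) (f : Nat) (y x : Int) (i : Int)
    (h : ¬ pvInB arr.length y x) : pvIsHunting arr f y x i = false := by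
  cases f with
  | zero => rfl
  | succ f => simp only [pvIsHunting]; rw [if_neg]; exact h

lemma pv_phi_pos (n dyi dxi y x : Int) (hdir : pvDirOK dyi dxi) (h : pvInB n y x) :
    1 ≤ pvPhi n dyi dxi y x := by
  obtain ⟨h1, h2, h3, h4⟩ := h
  rcases hdir with rfl | rfl | ⟨rfl, rfl | rfl⟩ <;> simp [pvPhi] <;> omega

lemma pv_phi_step (n dyi dxi y x : Int) (hdir : pvDirOK dyi dxi) (h : pvInB n y x) :
    pvPhi n dyi dxi (y + dyi) (x + dxi) + 1 = pvPhi n dyi dxi y x := by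
  obtain ⟨h1, h2, h3, h4⟩ := h
  rcases hdir with rfl | rfl | ⟨rfl, rfl | rfl⟩ <;> simp [pvPhi] <;> omega

lemma pv_phi_le (n dyi dxi y x : Int) (hdir : pvDirOK dyi dxi) (h : pvInB n y x) :
    pvPhi n dyi dxi y x ≤ n.toNat := by
  obtain ⟨h1, h2, h3, h4⟩ := h
  rcases hdir with rfl | rfl | ⟨rfl, rfl | rfl⟩ <;> simp [pvPhi] <;> omega
lemma pv_hunt_congr (arr : List (List Int)) (dyi dxi i : Int)
    (hdir : pvDirOK dyi dxi)
    (hdy : (PySem.List.pyGet? pvDyl i).getD 0 = dyi)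
    (hdx : (PySem.List.pyGet? pvDxl i).getD 0 = dxi) :
    ∀ (f g : Nat) (y x : Int),
      pvPhi arr.length dyi dxi y x ≤ f → pvPhi arr.length dyi dxi y x ≤ g →
      pvIsHunting arr f y x i = pvIsHunting arr g y x i := by
  intro f
  induction f with
  | zero =>
    intro g y x hf hg
    have hnb : ¬ pvInB arr.length y x := by
      intro h; have := pv_phi_pos arr.length dyi dxi y x hdir h; omega
    rw [pv_hunt_oob arr 0 y x i hnb, pv_hunt_oob arr g y x i hnb]
  | succ f ih =>
    intro g y x hf hg
    by_cases hin : pvInB arr.length y x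
    · cases g with
      | zero =>
        have := pv_phi_pos arr.length dyi dxi y x hdir hin; omega
      | succ g =>
        simp only [pvIsHunting, hdy, hdx]
        have hin' : 0 ≤ y ∧ y < (arr.length:Int) ∧ 0 ≤ x ∧ x < (arr.length:Int) := hin
        rw [if_pos hin', if_pos hin']
        by_cases hc : pvCell arr y x == 2
        · rw [if_pos hc, if_pos hc]
          have hstep := pv_phi_step arr.length dyi dxi y x hdir hin
          exact ih g (y + dyi) (x + dxi) (by omega) (by omega)
        · rw [if_neg hc, if_neg hc]
    · rw [pv_hunt_oob arr (f+1) y x i hin, pv_hunt_oob arr g y x i hin]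
lemma pv_hunt_imp_inb (arr : List (List Int)) (y x : Int) (i : Int)
    (h : pvHunt arr y x i = true) : pvInB arr.length y x := by
  by_contra hnb
  rw [pvHunt, pv_hunt_oob arr _ y x i hnb] at h
  exact Bool.false_ne_true h

lemma pv_hunt_unfold (arr : List (List Int)) (dyi dxi i : Int)
    (hdir : pvDirOK dyi dxi)
    (hdy : (PySem.List.pyGet? pvDyl i).getD 0 = dyi)
    (hdx : (PySem.List.pyGet? pvDxl i).getD 0 = dxi)
    (y x : Int) (hin : pvInB arr.length y x) :
    pvHunt arr y x i =
      if pvCell arr y x == 2 then pvHunt arr (y + dyi) (x + dxi) i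
      else pvCell arr y x == 1 := by
  have hin' : 0 ≤ y ∧ y < (arr.length:Int) ∧ 0 ≤ x ∧ x < (arr.length:Int) := hin
  rw [pvHunt]
  simp only [pvIsHunting, hdy, hdx]
  rw [if_pos hin']
  by_cases hc : pvCell arr y x == 2
  · rw [if_pos hc, if_pos hc]
    have hstep := pv_phi_step arr.length dyi dxi y x hdir hin
    have hle := pv_phi_le arr.length dyi dxi y x hdir hin
    exact pv_hunt_congr arr dyi dxi i hdir hdy hdx arr.length (arr.length + 1)
      (y + dyi) (x + dxi) (by omega) (by omega)
  · rw [if_neg hc, if_neg hc]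

def pvStep (arr : List (List Int)) (dyi dxi : Int)
    (r : PySem.Set (Int × Int)) (p : Int × Int) : PySem.Set (Int × Int) :=
  if pvCell arr p.1 p.2 == 1 || (pvCell arr p.1 p.2 == 2 && PySem.Set.contains r (p.1 + dyi, p.2 + dxi)) then
    PySem.Set.add r (p.1, p.2)
  else r

def pvOrder (n dyi dxi : Int) : List (Int × Int) :=
  (if dyi == 1 then (PySem.List.pyRange 0 n 1).reverse else PySem.List.pyRange 0 n 1).flatMap
    (fun y => (if dxi == 1 then (PySem.List.pyRange 0 n 1).reverse else PySem.List.pyRange 0 n 1).map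
      (fun x => (y, x)))

lemma pv_reachdir_eq (arr : List (List Int)) (dyi dxi : Int) :
    pvReachDir arr dyi dxi =
      (pvOrder arr.length dyi dxi).foldl (pvStep arr dyi dxi) PySem.Set.empty := by
  simp only [pvReachDir, pvOrder, List.foldl_flatMap, List.foldl_map, pvStep]

lemma pv_mem_ifrev (n v : Int) (c : Bool) :
    v ∈ (if c then (PySem.List.pyRange 0 n 1).reverse else PySem.List.pyRange 0 n 1) ↔
      0 ≤ v ∧ v < n := by
  split <;> simp [PySem.List.mem_pyRange_one]

lemma pv_mem_order (n dyi dxi : Int) (q : Int × Int) :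
    q ∈ pvOrder n dyi dxi ↔ pvInB n q.1 q.2 := by
  obtain ⟨qy, qx⟩ := q
  simp only [pvOrder, List.mem_flatMap, List.mem_map]
  constructor
  · rintro ⟨y, hy, x, hx, heq⟩
    cases heq
    rw [pv_mem_ifrev] at hy hx
    exact ⟨hy.1, hy.2, hx.1, hx.2⟩
  · rintro ⟨h1, h2, h3, h4⟩
    exact ⟨qy, (pv_mem_ifrev ..).2 ⟨h1, h2⟩, qx, (pv_mem_ifrev ..).2 ⟨h3, h4⟩, rfl⟩
lemma pv_pairwise_prod (ys xs : List Int) (S T : Int → Int → Prop)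
    (hy : ys.Pairwise S) (hx : xs.Pairwise T) :
    (ys.flatMap (fun y => xs.map (fun x => (y, x)))).Pairwise
      (fun a b : Int × Int => S a.1 b.1 ∨ (a.1 = b.1 ∧ T a.2 b.2)) := by
  induction ys with
  | nil => simp
  | cons y ys ih =>
    rw [List.flatMap_cons, List.pairwise_append]
    refine ⟨?_, ih hy.tail, ?_⟩
    · rw [List.pairwise_map]
      exact hx.imp (fun h => Or.inr ⟨rfl, h⟩)
    · rintro a ha b hb
      rw [List.mem_map] at ha
      obtain ⟨x, hx', rfl⟩ := ha
      rw [List.mem_flatMap] at hb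
      obtain ⟨y', hy', hb'⟩ := hb
      rw [List.mem_map] at hb'
      obtain ⟨x', hx'', rfl⟩ := hb'
      exact Or.inl (List.rel_of_pairwise_cons hy hy')
lemma pv_ifrev_pairwise (n : Int) (c : Bool) :
    (if c then (PySem.List.pyRange 0 n 1).reverse else PySem.List.pyRange 0 n 1).Pairwise
      (fun a b => (c = true ∧ b < a) ∨ (c = false ∧ a < b)) := by
  cases c
  · rw [if_neg (by simp)]
    exact (PySem.List.pairwise_lt_pyRange_one 0 n).imp (fun h => Or.inr ⟨rfl, h⟩)
  · rw [if_pos rfl, List.pairwise_reverse]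
    exact (PySem.List.pairwise_lt_pyRange_one 0 n).imp (fun h => Or.inl ⟨rfl, h⟩)

lemma pv_order_pairwise (n dyi dxi : Int) (hdir : pvDirOK dyi dxi) :
    (pvOrder n dyi dxi).Pairwise (fun a b => (a.1 + dyi, a.2 + dxi) ≠ b) := by
  have h := pv_pairwise_prod _ _ _ _ (pv_ifrev_pairwise n (dyi == 1)) (pv_ifrev_pairwise n (dxi == 1))
  rw [pvOrder]
  refine h.imp ?_
  rintro ⟨a1, a2⟩ ⟨b1, b2⟩ hab heq
  rw [Prod.mk.injEq] at heq
  obtain ⟨e1, e2⟩ := heq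
  rcases hdir with rfl | rfl | ⟨rfl, rfl | rfl⟩ <;>
    rcases hab with (⟨hc, hlt⟩ | ⟨hc, hlt⟩) | ⟨he, ⟨hc, hlt⟩ | ⟨hc, hlt⟩⟩ <;>
    simp_all <;> omega

lemma pv_order_nodup (n dyi dxi : Int) : (pvOrder n dyi dxi).Nodup := by
  have h := pv_pairwise_prod _ _ _ _ (pv_ifrev_pairwise n (dyi == 1)) (pv_ifrev_pairwise n (dxi == 1))
  rw [pvOrder, List.Nodup]
  refine h.imp ?_
  rintro ⟨a1, a2⟩ ⟨b1, b2⟩ hab heq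
  rw [Prod.mk.injEq] at heq
  obtain ⟨e1, e2⟩ := heq
  rcases hab with (⟨hc, hlt⟩ | ⟨hc, hlt⟩) | ⟨he, ⟨hc, hlt⟩ | ⟨hc, hlt⟩⟩ <;> omega
lemma pv_nbd_ne_self (dyi dxi : Int) (hdir : pvDirOK dyi dxi) (p : Int × Int) :
    (p.1 + dyi, p.2 + dxi) ≠ p := by
  obtain ⟨p1, p2⟩ := p
  intro h
  rw [Prod.mk.injEq] at h
  rcases hdir with rfl | rfl | ⟨rfl, rfl | rfl⟩ <;> omega

lemma pv_fold_inv (arr : List (List Int)) (dyi dxi i : Int)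
    (hdir : pvDirOK dyi dxi)
    (hdy : (PySem.List.pyGet? pvDyl i).getD 0 = dyi)
    (hdx : (PySem.List.pyGet? pvDxl i).getD 0 = dxi) :
    ∀ (l : List (Int × Int)) (r : PySem.Set (Int × Int)),
      (∀ p ∈ l, pvInB arr.length p.1 p.2) →
      l.Nodup →
      l.Pairwise (fun a b => (a.1 + dyi, a.2 + dxi) ≠ b) →
      (∀ p ∈ l, p ∉ r) →
      (∀ q, q ∉ l → (q ∈ r ↔ pvInB arr.length q.1 q.2 ∧ pvHunt arr q.1 q.2 i = true)) →
      ∀ q, q ∈ l.foldl (pvStep arr dyi dxi) r ↔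
        (q ∈ r ∨ (q ∈ l ∧ pvHunt arr q.1 q.2 i = true)) := by
  intro l
  induction l with
  | nil => intro r _ _ _ _ hr q; simp [List.foldl_nil]
  | cons p l ih =>
    intro r hinb hnd hpw hdisj hr q
    obtain ⟨p1, p2⟩ := p
    have hinp : pvInB arr.length p1 p2 := hinb _ (List.mem_cons_self ..)
    have hnbp : (p1 + dyi, p2 + dxi) ∉ (p1, p2) :: l := by
      intro hmem
      rcases List.mem_cons.1 hmem with heq | hmem'
      · exact pv_nbd_ne_self dyi dxi hdir (p1, p2) heq
      · exact (List.rel_of_pairwise_cons hpw hmem') rfl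
    have hrnb := hr _ hnbp
    have hhp := pv_hunt_unfold arr dyi dxi i hdir hdy hdx p1 p2 hinp
    have hb : (pvCell arr p1 p2 == 1 ||
        (pvCell arr p1 p2 == 2 && PySem.Set.contains r (p1 + dyi, p2 + dxi))) =
        pvHunt arr p1 p2 i := by
      rw [hhp]
      by_cases hc2 : (pvCell arr p1 p2 == 2) = true
      · have hc1 : (pvCell arr p1 p2 == 1) = false := by
          rw [beq_iff_eq] at hc2
          simp [hc2]
        rw [if_pos hc2, hc1, hc2, Bool.false_or, Bool.true_and]
        by_cases hh : pvHunt arr (p1 + dyi) (p2 + dxi) i = true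
        · have hin' := pv_hunt_imp_inb arr _ _ i hh
          rw [hh, PySem.Set.contains_iff]
          exact hrnb.2 ⟨hin', hh⟩
        · have h1 : PySem.Set.contains r (p1 + dyi, p2 + dxi) = false := by
            rw [← Bool.not_eq_true, PySem.Set.contains_iff]
            exact fun hm => hh ((hrnb.1 hm).2)
          rw [h1, Bool.not_eq_true] at *
          exact hh.symm
      · have hc2' : (pvCell arr p1 p2 == 2) = false := Bool.eq_false_iff.2 hc2
        rw [if_neg hc2, hc2', Bool.false_and, Bool.or_false]
    have hstep1 : pvStep arr dyi dxi r (p1, p2) =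
        if pvHunt arr p1 p2 i = true then PySem.Set.add r (p1, p2) else r := by
      rw [pvStep]
      simp only [hb]
    rw [List.foldl_cons, hstep1]
    set r1 := if pvHunt arr p1 p2 i = true then PySem.Set.add r (p1, p2) else r with hr1
    have hmemr1 : ∀ q', q' ∈ r1 ↔ (q' ∈ r ∨ (q' = (p1, p2) ∧ pvHunt arr p1 p2 i = true)) := by
      intro q'
      rw [hr1]
      split
      · rename_i hh
        rw [PySem.Set.mem_add]
        constructor
        · rintro (h | h)
          · exact Or.inl h
          · exact Or.inr ⟨h, hh⟩
        · rintro (h | ⟨h, _⟩)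
          · exact Or.inl h
          · exact Or.inr h
      · rename_i hh
        constructor
        · exact Or.inl
        · rintro (h | ⟨_, h⟩)
          · exact h
          · exact absurd h hh
    have hpnotr : (p1, p2) ∉ r := hdisj _ (List.mem_cons_self ..)
    have ihres := ih r1
      (fun p' hp' => hinb p' (List.mem_cons_of_mem _ hp'))
      (List.Nodup.of_cons hnd)
      hpw.tail
      (fun p' hp' hmem => by
        rcases (hmemr1 p').1 hmem with h | ⟨h, _⟩
        · exact hdisj p' (List.mem_cons_of_mem _ hp') h
        · rw [h] at hp'
          exact (List.nodup_cons.1 hnd).1 hp')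
      (fun q' hq' => by
        rw [hmemr1]
        by_cases hqp : q' = (p1, p2)
        · subst hqp
          constructor
          · rintro (h | ⟨_, h⟩)
            · exact absurd h hpnotr
            · exact ⟨hinp, h⟩
          · rintro ⟨_, h⟩
            exact Or.inr ⟨rfl, h⟩
        · have hql : q' ∉ (p1, p2) :: l := by
            intro hm
            rcases List.mem_cons.1 hm with h | h
            · exact hqp h
            · exact hq' h
          rw [← hr q' hql]
          constructor
          · rintro (h | ⟨h, _⟩)
            · exact h
            · exact absurd h hqp
          · exact Or.inl)
      q
    rw [ihres, hmemr1]
    constructor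
    · rintro ((h | ⟨rfl, hh⟩) | ⟨h, hh⟩)
      · exact Or.inl h
      · exact Or.inr ⟨List.mem_cons_self .., hh⟩
      · exact Or.inr ⟨List.mem_cons_of_mem _ h, hh⟩
    · rintro (h | ⟨h, hh⟩)
      · exact Or.inl (Or.inl h)
      · rcases List.mem_cons.1 h with rfl | h'
        · exact Or.inl (Or.inr ⟨rfl, hh⟩)
        · exact Or.inr ⟨h', hh⟩
lemma pv_reach_mem (arr : List (List Int)) (dyi dxi i : Int)
    (hdir : pvDirOK dyi dxi)
    (hdy : (PySem.List.pyGet? pvDyl i).getD 0 = dyi)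
    (hdx : (PySem.List.pyGet? pvDxl i).getD 0 = dxi) (q : Int × Int) :
    q ∈ pvReachDir arr dyi dxi ↔
      (pvInB arr.length q.1 q.2 ∧ pvHunt arr q.1 q.2 i = true) := by
  rw [pv_reachdir_eq]
  rw [pv_fold_inv arr dyi dxi i hdir hdy hdx (pvOrder arr.length dyi dxi) PySem.Set.empty
    (fun p hp => (pv_mem_order ..).1 hp)
    (pv_order_nodup ..)
    (pv_order_pairwise _ _ _ hdir)
    (fun p _ hmem => (List.not_mem_nil).elim hmem)
    (fun q' hq' => by
      constructor
      · intro h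
        exact (List.not_mem_nil h).elim
      · rintro ⟨hin, _⟩
        exact (hq' ((pv_mem_order ..).2 hin)).elim)
    q]
  constructor
  · rintro (h | ⟨h, hh⟩)
    · exact (List.not_mem_nil h).elim
    · exact ⟨(pv_mem_order ..).1 h, hh⟩
  · rintro ⟨hin, hh⟩
    exact Or.inr ⟨(pv_mem_order ..).2 hin, hh⟩

lemma pv_mem_foldl_union (f : Int → PySem.Set (Int × Int)) (l : List Int)
    (s0 : PySem.Set (Int × Int)) (q : Int × Int) :
    q ∈ l.foldl (fun s i => PySem.Set.union s (f i)) s0 ↔ q ∈ s0 ∨ ∃ i ∈ l, q ∈ f i := by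
  induction l generalizing s0 with
  | nil => simp
  | cons a l ih =>
    rw [List.foldl_cons, ih]
    rw [PySem.Set.mem_union]
    constructor
    · rintro ((h | h) | ⟨i, hi, h⟩)
      · exact Or.inl h
      · exact Or.inr ⟨a, List.mem_cons_self .., h⟩
      · exact Or.inr ⟨i, List.mem_cons_of_mem _ hi, h⟩
    · rintro (h | ⟨i, hi, h⟩)
      · exact Or.inl (Or.inl h)
      · rcases List.mem_cons.1 hi with rfl | hi'
        · exact Or.inl (Or.inr h)
        · exact Or.inr ⟨i, hi', h⟩

lemma pv_dir_of_mem (i : Int) (hi : i ∈ PySem.List.pyRange 0 8 1) :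
    pvDirOK ((PySem.List.pyGet? pvDyl i).getD 0) ((PySem.List.pyGet? pvDxl i).getD 0) := by
  rw [PySem.List.mem_pyRange_one] at hi
  obtain ⟨h1, h2⟩ := hi
  interval_cases i <;> simp only [pvDirOK] <;> decide

theorem pv_main (arr : List (List Int)) : solution arr = solution_alt arr := by
  rw [solution, solution_alt]
  apply PySem.List.foldl_congr_mem
  intro acc y hy
  apply PySem.List.foldl_congr_mem
  intro acc' x hx
  rw [PySem.List.mem_pyRange_one] at hy hx
  have hin : pvInB arr.length y x := ⟨hy.1, hy.2, hx.1, hx.2⟩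
  by_cases hc : (pvCell arr y x == 2) = true
  · rw [if_pos hc, hc, Bool.true_and]
    congr 1
    rw [eq_iff_iff]
    rw [List.any_eq_true, PySem.Set.contains_iff,
      pv_mem_foldl_union (fun i => pvReachDir arr ((PySem.List.pyGet? pvDyl i).getD 0)
        ((PySem.List.pyGet? pvDxl i).getD 0)) (PySem.List.pyRange 0 8 1) PySem.Set.empty (y, x)]
    constructor
    · rintro ⟨i, hi, h⟩
      refine Or.inr ⟨i, hi, ?_⟩
      rw [pv_reach_mem arr _ _ i (pv_dir_of_mem i hi) rfl rfl]
      refine ⟨hin, ?_⟩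
      rw [pv_hunt_unfold arr _ _ i (pv_dir_of_mem i hi) rfl rfl y x hin, if_pos hc]
      exact h
    · rintro (h | ⟨i, hi, h⟩)
      · exact (List.not_mem_nil h).elim
      · refine ⟨i, hi, ?_⟩
        rw [pv_reach_mem arr _ _ i (pv_dir_of_mem i hi) rfl rfl] at h
        have := h.2
        rw [pv_hunt_unfold arr _ _ i (pv_dir_of_mem i hi) rfl rfl y x hin, if_pos hc] at this
        exact this
  · have hc' : (pvCell arr y x == 2) = false := Bool.eq_false_iff.2 hc
    rw [if_neg hc, hc', Bool.false_and, if_neg (by simp)]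

-- ===== VERDICT (by name: the statement is the Claim_ definition above) =====
theorem solution_spec : Claim_equal_solution := by
  intro arr _ _
  exact pv_main arr
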